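-- pv_equiv track=rewrite | github.com/ABowSEC/NetSleuth | src/utils/device_mapper.py | identify_device_by_behavior
-- ===== SOURCE A (Python) =====
-- def identify_device_by_behavior(ip, dns_queries=None, connections=None):
--     """Identify device type based on its network behavior patterns"""
--     if not dns_queries:
--         dns_queries = []
--     if not connections:
--         connections = []
--
--     # Convert to lowercase for matching
--     dns_lower = [q.lower() for q in dns_queries]
--     conn_lower = [c.lower() for c in connections]
--
--     # Apple devices
--     if any('apple' in q for q in dns_lower) or any('_airplay' in q for q in dns_lower):
--         return "Apple Device"
--
--     # Smart TVs
--     if any('webos' in q for q in dns_lower) or any('lg' in q for q in dns_lower):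
--         return "LG Smart TV"
--     if any('roku' in q for q in dns_lower):
--         return "Roku Device"
--     if any('firetv' in q for q in dns_lower) or any('amazon' in q for q in dns_lower):
--         return "Amazon Fire TV"
--
--     # Gaming consoles
--     if any('xbox' in q for q in dns_lower) or any('playstation' in q for q in dns_lower):
--         return "Gaming Console"
--
--     # Smart home devices
--     if any('homekit' in q for q in dns_lower) or any('_matter' in q for q in dns_lower):
--         return "Smart Home Device"
--     if any('spotify' in q for q in dns_lower):
--         return "Spotify Device"
--
--     # Mobile devices
--     if any('companion-link' in q for q in dns_lower):
--         return "Mobile Device"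
--
--     # Routers/Gateways
--     if ip in ['10.0.0.1', '192.168.1.1', '192.168.0.1']:
--         return "Router/Gateway"
--
--     # DNS servers
--     if ip in ['8.8.8.8', '8.8.4.4', '1.1.1.1', '75.75.75.75']:
--         return "DNS Server"
--
--     return None
-- ===== SOURCE B (Python) =====
-- # Single pass over the queries: each lowered query gets the rank of its first
-- # matching keyword (keyword ranks are nondecreasing, so that IS its best rank);
-- # the label of the smallest rank seen wins, else an IP lookup table decides.
-- _KEYWORDS = [("apple", 0), ("_airplay", 0), ("webos", 1), ("lg", 1), ("roku", 2),
--              ("firetv", 3), ("amazon", 3), ("xbox", 4), ("playstation", 4),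
--              ("homekit", 5), ("_matter", 5), ("spotify", 6), ("companion-link", 7)]
-- _LABELS = ["Apple Device", "LG Smart TV", "Roku Device", "Amazon Fire TV",
--            "Gaming Console", "Smart Home Device", "Spotify Device", "Mobile Device"]
-- _IP_LABELS = {"10.0.0.1": "Router/Gateway", "192.168.1.1": "Router/Gateway",
--               "192.168.0.1": "Router/Gateway", "8.8.8.8": "DNS Server",
--               "8.8.4.4": "DNS Server", "1.1.1.1": "DNS Server", "75.75.75.75": "DNS Server"}
--
-- def _rank(ql):
--     for kw, r in _KEYWORDS:
--         if kw in ql: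
--             return r
--     return None
--
-- def identify_device_by_behavior(ip, dns_queries=None, connections=None):
--     ranks = [r for r in (_rank(q.lower()) for q in (dns_queries or [])) if r is not None]
--     if ranks:
--         return _LABELS[min(ranks)]
--     return _IP_LABELS.get(ip)
-- ===== Notes on version B (the rewrite author's own statement) =====
-- stated objective: alternative
-- what changed: Instead of testing ten rules each scanning all queries, B makes a single pass over the queries, assigning each lowered query the priority rank of its first matching keyword and returning the label of the minimum rank seen, with the IP fallback as a lookup table.
import Mathlib
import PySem

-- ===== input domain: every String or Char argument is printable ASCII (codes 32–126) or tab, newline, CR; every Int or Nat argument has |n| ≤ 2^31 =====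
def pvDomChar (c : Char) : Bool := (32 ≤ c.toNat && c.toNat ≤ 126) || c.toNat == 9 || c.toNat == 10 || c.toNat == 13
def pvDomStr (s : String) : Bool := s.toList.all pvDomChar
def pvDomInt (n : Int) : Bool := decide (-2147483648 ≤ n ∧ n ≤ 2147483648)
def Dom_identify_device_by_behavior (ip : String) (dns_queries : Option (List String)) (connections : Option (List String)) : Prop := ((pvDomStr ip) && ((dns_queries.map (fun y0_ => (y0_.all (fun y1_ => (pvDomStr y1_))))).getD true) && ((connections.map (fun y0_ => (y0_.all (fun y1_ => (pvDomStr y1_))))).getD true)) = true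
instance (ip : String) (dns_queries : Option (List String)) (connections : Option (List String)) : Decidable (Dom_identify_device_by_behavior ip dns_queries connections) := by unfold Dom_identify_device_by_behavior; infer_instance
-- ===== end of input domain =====

-- B replaces A's rule cascade by a single pass assigning each query a priority rank
-- (first matching keyword) and returning the label of the minimum rank, else an IP
-- lookup table (objective: alternative; return value only — no side effects involved).


-- ===== PORT A =====
def identify_device_by_behavior (ip : String) (dns_queries : Option (List String)) (connections : Option (List String)) : Option String :=
  -- 'if not dns_queries: dns_queries = []' replaces None/[] by []: on Option (List String) this is getD []
  let dnsq := dns_queries.getD []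
  let conns := connections.getD []
  let dns_lower := dnsq.map PySem.Str.lower
  let _conn_lower := conns.map PySem.Str.lower
  if dns_lower.any (fun q => PySem.Str.isIn "apple" q) || dns_lower.any (fun q => PySem.Str.isIn "_airplay" q) then some "Apple Device"
  else if dns_lower.any (fun q => PySem.Str.isIn "webos" q) || dns_lower.any (fun q => PySem.Str.isIn "lg" q) then some "LG Smart TV"
  else if dns_lower.any (fun q => PySem.Str.isIn "roku" q) then some "Roku Device"
  else if dns_lower.any (fun q => PySem.Str.isIn "firetv" q) || dns_lower.any (fun q => PySem.Str.isIn "amazon" q) then some "Amazon Fire TV"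
  else if dns_lower.any (fun q => PySem.Str.isIn "xbox" q) || dns_lower.any (fun q => PySem.Str.isIn "playstation" q) then some "Gaming Console"
  else if dns_lower.any (fun q => PySem.Str.isIn "homekit" q) || dns_lower.any (fun q => PySem.Str.isIn "_matter" q) then some "Smart Home Device"
  else if dns_lower.any (fun q => PySem.Str.isIn "spotify" q) then some "Spotify Device"
  else if dns_lower.any (fun q => PySem.Str.isIn "companion-link" q) then some "Mobile Device"
  else if ["10.0.0.1", "192.168.1.1", "192.168.0.1"].contains ip then some "Router/Gateway"
  else if ["8.8.8.8", "8.8.4.4", "1.1.1.1", "75.75.75.75"].contains ip then some "DNS Server"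
  else none

-- ===== PORT B =====
def pvKeywords : List (String × Nat) :=
  [("apple", 0), ("_airplay", 0), ("webos", 1), ("lg", 1), ("roku", 2),
   ("firetv", 3), ("amazon", 3), ("xbox", 4), ("playstation", 4),
   ("homekit", 5), ("_matter", 5), ("spotify", 6), ("companion-link", 7)]

def pvLabels : List String :=
  ["Apple Device", "LG Smart TV", "Roku Device", "Amazon Fire TV",
   "Gaming Console", "Smart Home Device", "Spotify Device", "Mobile Device"]

def pvIpLabels : PySem.Dict String String :=
  PySem.Dict.mk
    [("10.0.0.1", "Router/Gateway"), ("192.168.1.1", "Router/Gateway"),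
     ("192.168.0.1", "Router/Gateway"), ("8.8.8.8", "DNS Server"),
     ("8.8.4.4", "DNS Server"), ("1.1.1.1", "DNS Server"), ("75.75.75.75", "DNS Server")]

-- _rank: rank of the first matching keyword (None if no keyword matches)
def pvRank (ql : String) : Option Nat :=
  (pvKeywords.find? (fun kr => PySem.Str.isIn kr.1 ql)).map (·.2)

def identify_device_by_behavior_alt (ip : String) (dns_queries : Option (List String)) (connections : Option (List String)) : Option String :=
  let ranks := (dns_queries.getD []).filterMap (fun q => pvRank (PySem.Str.lower q))
  match PySem.List.min? ranks (fun r => r) with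
  | some r => pvLabels[r]?
  | none => PySem.Dict.get? pvIpLabels ip

-- ===== PRECONDITION & SPEC =====
def Spec_identify_device_by_behavior (ip : String) (dns_queries : Option (List String)) (connections : Option (List String)) (out : Option String) : Prop := out = identify_device_by_behavior_alt ip dns_queries connections
instance (ip : String) (dns_queries : Option (List String)) (connections : Option (List String)) (out : Option String) : Decidable (Spec_identify_device_by_behavior ip dns_queries connections out) := by unfold Spec_identify_device_by_behavior; infer_instance

-- ===== CLAIM (what is proved, stated in full; the proofs are below) =====
def Claim_equal_identify_device_by_behavior : Prop := ∀ (ip : String) (dns_queries : Option (List String)) (connections : Option (List String)), Dom_identify_device_by_behavior ip dns_queries connections → Spec_identify_device_by_behavior ip dns_queries connections (identify_device_by_behavior ip dns_queries connections)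

-- ===== LEMMAS AND PROOFS =====

-- first-true-index selector over the 8 rank flags
def pvF (a0 a1 a2 a3 a4 a5 a6 a7 : Bool) : Option Nat :=
  if a0 then some 0 else if a1 then some 1 else if a2 then some 2 else if a3 then some 3
  else if a4 then some 4 else if a5 then some 5 else if a6 then some 6 else if a7 then some 7
  else none

-- min of two optional ranks (none = no match)
def pvMinO : Option Nat → Option Nat → Option Nat
  | none, y => y
  | x, none => x
  | some a, some b => some (min a b)

theorem pvRank_eq (ql : String) :
    pvRank ql = pvF
      (PySem.Str.isIn "apple" ql || PySem.Str.isIn "_airplay" ql)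
      (PySem.Str.isIn "webos" ql || PySem.Str.isIn "lg" ql)
      (PySem.Str.isIn "roku" ql)
      (PySem.Str.isIn "firetv" ql || PySem.Str.isIn "amazon" ql)
      (PySem.Str.isIn "xbox" ql || PySem.Str.isIn "playstation" ql)
      (PySem.Str.isIn "homekit" ql || PySem.Str.isIn "_matter" ql)
      (PySem.Str.isIn "spotify" ql)
      (PySem.Str.isIn "companion-link" ql) := by
  unfold pvRank pvKeywords pvF
  simp only [List.find?_cons, List.find?_nil]
  generalize PySem.Str.isIn "apple" ql = c0
  generalize PySem.Str.isIn "_airplay" ql = c1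
  generalize PySem.Str.isIn "webos" ql = c2
  generalize PySem.Str.isIn "lg" ql = c3
  generalize PySem.Str.isIn "roku" ql = c4
  generalize PySem.Str.isIn "firetv" ql = c5
  generalize PySem.Str.isIn "amazon" ql = c6
  generalize PySem.Str.isIn "xbox" ql = c7
  generalize PySem.Str.isIn "playstation" ql = c8
  generalize PySem.Str.isIn "homekit" ql = c9
  generalize PySem.Str.isIn "_matter" ql = c10
  generalize PySem.Str.isIn "spotify" ql = c11
  generalize PySem.Str.isIn "companion-link" ql = c12
  revert c0 c1 c2 c3 c4 c5 c6 c7 c8 c9 c10 c11 c12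
  decide

theorem pvMinO_pvF (a0 a1 a2 a3 a4 a5 a6 a7 b0 b1 b2 b3 b4 b5 b6 b7 : Bool) :
    pvMinO (pvF a0 a1 a2 a3 a4 a5 a6 a7) (pvF b0 b1 b2 b3 b4 b5 b6 b7)
      = pvF (a0 || b0) (a1 || b1) (a2 || b2) (a3 || b3) (a4 || b4) (a5 || b5) (a6 || b6) (a7 || b7) := by
  revert a0 a1 a2 a3 a4 a5 a6 a7 b0 b1 b2 b3 b4 b5 b6 b7
  decide

theorem pvFoldlMin (t : List Nat) (x y : Nat) :
    t.foldl min (min x y) = min x (t.foldl min y) := by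
  induction t generalizing y with
  | nil => rfl
  | cons a t ih =>
      simp only [List.foldl_cons]
      rw [min_assoc, ih]

theorem pvMin?_cons (x : Nat) (t : List Nat) :
    PySem.List.min? (x :: t) (fun r => r) = pvMinO (some x) (PySem.List.min? t (fun r => r)) := by
  cases t with
  | nil => simp [PySem.List.min?, pvMinO]
  | cons y t =>
      rw [PySem.List.min?_id_cons, PySem.List.min?_id_cons]
      simp only [List.foldl_cons, pvMinO]
      rw [pvFoldlMin]

theorem pvMain (qs : List String) :
    PySem.List.min? (qs.filterMap (fun q => pvRank (PySem.Str.lower q))) (fun r => r)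
      = pvF
        (qs.any (fun q => PySem.Str.isIn "apple" (PySem.Str.lower q)) || qs.any (fun q => PySem.Str.isIn "_airplay" (PySem.Str.lower q)))
        (qs.any (fun q => PySem.Str.isIn "webos" (PySem.Str.lower q)) || qs.any (fun q => PySem.Str.isIn "lg" (PySem.Str.lower q)))
        (qs.any (fun q => PySem.Str.isIn "roku" (PySem.Str.lower q)))
        (qs.any (fun q => PySem.Str.isIn "firetv" (PySem.Str.lower q)) || qs.any (fun q => PySem.Str.isIn "amazon" (PySem.Str.lower q)))
        (qs.any (fun q => PySem.Str.isIn "xbox" (PySem.Str.lower q)) || qs.any (fun q => PySem.Str.isIn "playstation" (PySem.Str.lower q)))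
        (qs.any (fun q => PySem.Str.isIn "homekit" (PySem.Str.lower q)) || qs.any (fun q => PySem.Str.isIn "_matter" (PySem.Str.lower q)))
        (qs.any (fun q => PySem.Str.isIn "spotify" (PySem.Str.lower q)))
        (qs.any (fun q => PySem.Str.isIn "companion-link" (PySem.Str.lower q))) := by
  induction qs with
  | nil => simp [PySem.List.min?, pvF]
  | cons q qs ih =>
      have step : PySem.List.min? ((q :: qs).filterMap (fun q => pvRank (PySem.Str.lower q))) (fun r => r)
          = pvMinO (pvRank (PySem.Str.lower q))
              (PySem.List.min? (qs.filterMap (fun q => pvRank (PySem.Str.lower q))) (fun r => r)) := by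
        simp only [List.filterMap_cons]
        cases h : pvRank (PySem.Str.lower q) with
        | none => simp [pvMinO]
        | some r => rw [pvMin?_cons]
      rw [step, ih, pvRank_eq, pvMinO_pvF]
      simp only [List.any_cons]
      ac_rfl

theorem pvLabelStep (a0 a1 a2 a3 a4 a5 a6 a7 : Bool) (z : Option String) :
    (match pvF a0 a1 a2 a3 a4 a5 a6 a7 with
     | some r => pvLabels[r]?
     | none => z)
      = (if a0 then some "Apple Device" else if a1 then some "LG Smart TV"
         else if a2 then some "Roku Device" else if a3 then some "Amazon Fire TV"
         else if a4 then some "Gaming Console" else if a5 then some "Smart Home Device"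
         else if a6 then some "Spotify Device" else if a7 then some "Mobile Device"
         else z) := by
  cases a0 <;> cases a1 <;> cases a2 <;> cases a3 <;> cases a4 <;> cases a5 <;> cases a6 <;> cases a7 <;> rfl

theorem pvIpLemma (ip : String) :
    PySem.Dict.get? pvIpLabels ip
      = (if ["10.0.0.1", "192.168.1.1", "192.168.0.1"].contains ip then some "Router/Gateway"
         else if ["8.8.8.8", "8.8.4.4", "1.1.1.1", "75.75.75.75"].contains ip then some "DNS Server"
         else none) := by
  unfold pvIpLabels
  simp only [PySem.Dict.get?, List.find?_cons, List.find?_nil, List.contains_cons,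
    List.contains_nil, Bool.or_false, BEq.comm, Option.map]
  generalize (ip == ("10.0.0.1" : String)) = b0
  generalize (ip == ("192.168.1.1" : String)) = b1
  generalize (ip == ("192.168.0.1" : String)) = b2
  generalize (ip == ("8.8.8.8" : String)) = b3
  generalize (ip == ("8.8.4.4" : String)) = b4
  generalize (ip == ("1.1.1.1" : String)) = b5
  generalize (ip == ("75.75.75.75" : String)) = b6
  revert b0 b1 b2 b3 b4 b5 b6
  decide

-- ===== VERDICT (by name: the statement is the Claim_ definition above) =====
theorem identify_device_by_behavior_spec : Claim_equal_identify_device_by_behavior := by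
  intro ip dns_queries connections _
  unfold Spec_identify_device_by_behavior identify_device_by_behavior identify_device_by_behavior_alt
  simp only [List.any_map, Function.comp_def]
  rw [pvMain, pvLabelStep, pvIpLemma]
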